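-- pv_equiv track=rewrite | github.com/gliderkite/wumpus | src/motion.py | path_to_spins
-- ===== SOURCE A (Python) =====
-- DELTA = (0, -1), (1, 0), (0, 1), (-1, 0)
--
-- def neighbors(location, size=(4, 4)):
--   """Returns a generetor for the neighboring rooms."""
--   x, y = location
--   width, height = size
--   #  above cell
--   if y - 1 >= 0:
--     yield x, y - 1
--   # right cell
--   if x + 1 < width:
--     yield x + 1, y
--   # below cell
--   if y + 1 < height:
--     yield x, y + 1
--   # left cell
--   if x - 1 >= 0:
--     yield x - 1, y
--
-- def spins(source, direction, destination):
--   """Gets the number of rotations needed to have the destination room ahead."""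
--   # check if source and destination are neighbors
--   assert source in neighbors(destination)
--   # computes the difference between locations
--   diff = tuple([a - b for a, b in zip(destination, source)])
--   rot = DELTA.index(diff) - direction
--   rot = rot if rot != 3 else -1
--   # returns the minimum number of spins (clockwise vs counterclockwise)
--   return rot
--
-- def path_to_spins(path, direction):
--   """Gets a list of spins that an agent has to perform to follow the path."""
--   # check the presence of a valid path
--   assert path is not None
--   rotations = []
--   # follow the path and compute the steps needed to turn and then move forword
--   # the agent in order to reach the last location of the path
--   i = 0
--   while i < len(path) - 1:
--     rot = spins(path[i], direction, path[i + 1])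
--     rotations.append(rot)
--     direction = (direction + rot) % len(DELTA)
--     i += 1
--   return tuple(rotations)
-- ===== SOURCE B (Python) =====
-- DELTA = (0, -1), (1, 0), (0, 1), (-1, 0)
--
-- def neighbors(location, size=(4, 4)):
--   x, y = location
--   width, height = size
--   if y - 1 >= 0:
--     yield x, y - 1
--   if x + 1 < width:
--     yield x + 1, y
--   if y + 1 < height:
--     yield x, y + 1
--   if x - 1 >= 0:
--     yield x - 1, y
--
-- def path_to_spins(path, direction):
--   """Two-pass: absolute headings first, then consecutive differences."""
--   assert path is not None
--   # pass 1: absolute heading of each step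
--   headings = []
--   for src, dst in zip(path, path[1:]):
--     assert src in neighbors(dst)
--     headings.append(DELTA.index((dst[0] - src[0], dst[1] - src[1])))
--   # pass 2: rotations = differences of consecutive headings (first vs `direction`)
--   rotations = []
--   prev = direction
--   for h in headings:
--     r = h - prev
--     rotations.append(r if r != 3 else -1)
--     prev = h
--   return tuple(rotations)
-- ===== Notes on version B (the rewrite author's own statement) =====
-- stated objective: alternative
-- what changed: B splits the work into two passes: first it computes the absolute heading (DELTA index) of every step, then it derives each rotation as the difference of consecutive headings (the first against the initial direction), eliminating A's running `(direction + rot) % 4` accumulator.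
import Mathlib
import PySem

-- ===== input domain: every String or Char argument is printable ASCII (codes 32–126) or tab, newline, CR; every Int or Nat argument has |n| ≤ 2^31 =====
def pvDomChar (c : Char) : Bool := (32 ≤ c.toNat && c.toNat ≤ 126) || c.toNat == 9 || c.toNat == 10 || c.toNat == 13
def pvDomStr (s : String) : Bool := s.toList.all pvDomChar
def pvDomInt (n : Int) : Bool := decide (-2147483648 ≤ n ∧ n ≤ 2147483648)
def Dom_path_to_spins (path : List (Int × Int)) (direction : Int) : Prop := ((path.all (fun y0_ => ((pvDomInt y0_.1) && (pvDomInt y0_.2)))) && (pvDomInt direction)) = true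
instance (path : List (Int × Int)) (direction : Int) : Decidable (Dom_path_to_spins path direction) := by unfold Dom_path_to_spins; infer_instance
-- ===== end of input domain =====

-- B replaces A's per-step `(direction + rot) % 4` accumulator by two passes:
-- absolute headings first, then consecutive differences (alternative decomposition, same cost).

-- Shared module constant DELTA and the `neighbors` generator (default size (4,4)), as lists.
def pvDelta : List (Int × Int) := [(0, -1), (1, 0), (0, 1), (-1, 0)]

def pvNeighbors (loc : Int × Int) : List (Int × Int) :=
  (if loc.2 - 1 ≥ 0 then [(loc.1, loc.2 - 1)] else []) ++
  (if loc.1 + 1 < 4 then [(loc.1 + 1, loc.2)] else []) ++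
  (if loc.2 + 1 < 4 then [(loc.1, loc.2 + 1)] else []) ++
  (if loc.1 - 1 ≥ 0 then [(loc.1 - 1, loc.2)] else [])

-- ===== PORT A =====
-- `spins`: none = the assert fails / DELTA.index raises (excluded by Pre_).
def pvSpinsA (source : Int × Int) (direction : Int) (destination : Int × Int) : Option Int :=
  if source ∈ pvNeighbors destination then
    match PySem.List.index? pvDelta (destination.1 - source.1, destination.2 - source.2) with
    | some idx =>
      let rot : Int := (idx : Int) - direction
      some (if rot ≠ 3 then rot else -1)
    | none => none
  else none

-- A's while loop over consecutive pairs, carrying the running direction.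
def pvLoopA : (Int × Int) → List (Int × Int) → Int → Option (List Int)
  | _, [], _ => some []
  | cur, next :: rest, dir =>
    match pvSpinsA cur dir next with
    | some rot =>
      match pvLoopA next rest (PySem.Int.mod (dir + rot) 4) with
      | some rs => some (rot :: rs)
      | none => none
    | none => none

def path_to_spins (path : List (Int × Int)) (direction : Int) : List Int :=
  match path with
  | [] => []
  | p :: rest => (pvLoopA p rest direction).getD []

-- ===== PORT B =====
-- pass 1: absolute heading (DELTA index) of each step; none = assert/index failure.
def pvHeadingsB : (Int × Int) → List (Int × Int) → Option (List Int)
  | _, [] => some []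
  | src, dst :: rest =>
    if src ∈ pvNeighbors dst then
      match PySem.List.index? pvDelta (dst.1 - src.1, dst.2 - src.2), pvHeadingsB dst rest with
      | some h, some hs => some ((h : Int) :: hs)
      | _, _ => none
    else none

-- pass 2: rotations = differences of consecutive headings (first vs `direction`).
def pvRotsB : Int → List Int → List Int
  | _, [] => []
  | prev, h :: hs => (if h - prev ≠ 3 then h - prev else -1) :: pvRotsB h hs

def path_to_spins_alt (path : List (Int × Int)) (direction : Int) : List Int :=
  match path with
  | [] => []
  | p :: rest =>
    match pvHeadingsB p rest with
    | some hs => pvRotsB direction hs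
    | none => []

-- ===== PRECONDITION & SPEC =====
-- Pre_ excludes exactly the inputs where A raises: AssertionError when some consecutive
-- pair of rooms is not adjacent inside the default 4×4 grid.
def Pre_path_to_spins (path : List (Int × Int)) (direction : Int) : Prop :=
  ∀ p ∈ path.zip path.tail, p.1 ∈ pvNeighbors p.2

instance (path : List (Int × Int)) (direction : Int) : Decidable (Pre_path_to_spins path direction) := by
  unfold Pre_path_to_spins; infer_instance

def pvWitness_path_to_spins : (List (Int × Int)) × Int := ([(0, 0), (0, 1), (1, 1)], 0)

def Spec_path_to_spins (path : List (Int × Int)) (direction : Int) (out : List Int) : Prop := out = path_to_spins_alt path direction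
instance (path : List (Int × Int)) (direction : Int) (out : List Int) : Decidable (Spec_path_to_spins path direction out) := by unfold Spec_path_to_spins; infer_instance

-- ===== CLAIM (what is proved, stated in full; the proofs are below) =====
def Claim_equal_path_to_spins : Prop := ∀ (path : List (Int × Int)) (direction : Int), Dom_path_to_spins path direction → Pre_path_to_spins path direction → Spec_path_to_spins path direction (path_to_spins path direction)

-- ===== LEMMAS AND PROOFS =====

-- Adjacency makes DELTA.index succeed, with an index below 4.
theorem pv_adj_index (s d : Int × Int) (h : s ∈ pvNeighbors d) :
    ∃ k : Nat, k < 4 ∧ PySem.List.index? pvDelta (d.1 - s.1, d.2 - s.2) = some k := by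
  obtain ⟨a, b⟩ := s
  obtain ⟨c, e⟩ := d
  simp only [pvNeighbors, List.mem_append, List.mem_ite_nil_right, List.mem_singleton,
    Prod.mk.injEq] at h
  rcases h with ((⟨-, rfl, rfl⟩ | ⟨-, rfl, rfl⟩) | ⟨-, rfl, rfl⟩) | ⟨-, rfl, rfl⟩
  · refine ⟨2, by norm_num, ?_⟩
    rw [show ∀ x y : Int, (x - x, y - (y - 1)) = ((0 : Int), (1 : Int)) from
      fun x y => by rw [Prod.mk.injEq]; constructor <;> ring]
    decide
  · refine ⟨3, by norm_num, ?_⟩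
    rw [show ∀ x y : Int, (x - (x + 1), y - y) = ((-1 : Int), (0 : Int)) from
      fun x y => by rw [Prod.mk.injEq]; constructor <;> ring]
    decide
  · refine ⟨0, by norm_num, ?_⟩
    rw [show ∀ x y : Int, (x - x, y - (y + 1)) = ((0 : Int), (-1 : Int)) from
      fun x y => by rw [Prod.mk.injEq]; constructor <;> ring]
    decide
  · refine ⟨1, by norm_num, ?_⟩
    rw [show ∀ x y : Int, (x - (x - 1), y - y) = ((1 : Int), (0 : Int)) from
      fun x y => by rw [Prod.mk.injEq]; constructor <;> ring]
    decide

-- A's updated running direction equals the step's absolute heading.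
theorem pv_dir_step (k : Nat) (hk : k < 4) (dir : Int) :
    PySem.Int.mod (dir + (if (k : Int) - dir ≠ 3 then (k : Int) - dir else -1)) 4 = (k : Int) := by
  rw [PySem.Int.mod_eq_emod_of_pos (show (0 : Int) < 4 by norm_num)]
  split_ifs <;> omega

-- Core invariant: A's loop equals "headings, then consecutive differences".
theorem pv_loop_eq (rest : List (Int × Int)) :
    ∀ (cur : Int × Int) (dir : Int),
      (∀ p ∈ (cur :: rest).zip rest, p.1 ∈ pvNeighbors p.2) →
      pvLoopA cur rest dir = (pvHeadingsB cur rest).map (pvRotsB dir) := by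
  induction rest with
  | nil => intro cur dir _; rfl
  | cons next rest ih =>
    intro cur dir hch
    have hadj : cur ∈ pvNeighbors next := hch (cur, next) (by simp)
    have hch' : ∀ p ∈ (next :: rest).zip rest, p.1 ∈ pvNeighbors p.2 := by
      intro p hp
      exact hch p (by simp [List.zip_cons_cons] at hp ⊢; tauto)
    obtain ⟨k, hk, hidx⟩ := pv_adj_index cur next hadj
    simp only [pvLoopA, pvHeadingsB, pvSpinsA, if_pos hadj, hidx]
    rw [ih next (PySem.Int.mod (dir + _) 4) hch', pv_dir_step k hk dir]
    cases pvHeadingsB next rest with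
    | none => rfl
    | some hs => simp [pvRotsB]

-- ===== VERDICT (by name: the statement is the Claim_ definition above) =====
theorem path_to_spins_spec : Claim_equal_path_to_spins := by
  intro path direction _ hpre
  unfold Spec_path_to_spins
  cases path with
  | nil => rfl
  | cons p rest =>
    show (pvLoopA p rest direction).getD [] = _
    have hpre' : ∀ q ∈ (p :: rest).zip rest, q.1 ∈ pvNeighbors q.2 := by
      intro q hq; exact hpre q (by simpa using hq)
    rw [pv_loop_eq rest p direction hpre']
    cases h : pvHeadingsB p rest <;> simp [path_to_spins_alt, h]
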